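-- pv_equiv track=rewrite | github.com/Arsen1302/Code-copy-detector | TestData/solutions/problem_504_2_1.py | solution_504_2_1
-- ===== SOURCE A (Python) =====
-- from typing import List
--
-- def solution_504_2_1(s: str) -> List[str]:
--
--     def solution_504_2_2(inputStr):
--         # integer (no leading zeros or '0' itself)
--         output = [inputStr] if inputStr[0] != '0' or inputStr == '0' else []
--         # float
--         for i in range(1, len(inputStr)):
--             digit, decimal = inputStr[:i], inputStr[i:]
--             # checking digit (left extra zeros)
--             if len(digit) >= 2 and digit[0] == '0':
--                 break
--             # checking decimal (right extra zeros)
--             if decimal[-1] == '0':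
--                 break
--             output.append(f'{digit}.{decimal}')
--         return output
--
--     numStr = s[1:-1]
--     output = []
--     for i in range(1, len(numStr)):
--         for x in solution_504_2_2(numStr[:i]):
--             for y in solution_504_2_2(numStr[i:]):
--                 output.append(f'({x}, {y})')
--
--     return output
-- ===== SOURCE B (Python) =====
-- def solution_504_2_1(s):
--     num = s[1:-1]
--     n = len(num)
--
--     # Dynamic programming on split positions: P[i] holds every one-dot placement
--     # inside num[:i] (split position ascending), built left-to-right from P[i-1];
--     # S[i] holds the same for num[i:], built right-to-left from S[i+1].
--     P = [[] for _ in range(n + 1)]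
--     for i in range(1, n):
--         c = num[i]
--         P[i + 1] = [d + c for d in P[i]] + [num[:i] + '.' + c]
--     S = [[] for _ in range(n + 1)]
--     for i in range(n - 2, -1, -1):
--         c = num[i]
--         S[i] = [c + '.' + num[i + 1:]] + [c + d for d in S[i + 1]]
--
--     def forms(t, dots):
--         out = [t] if t == '0' or t[0] != '0' else []
--         if t[-1] != '0':
--             out += dots if t[0] != '0' else dots[:1]
--         return out
--
--     return [f'({x}, {y})'
--             for i in range(1, n)
--             for x in forms(num[:i], P[i])
--             for y in forms(num[i:], S[i])]
-- ===== Notes on version B (the rewrite author's own statement) =====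
-- stated objective: alternative
-- what changed: A re-slices every prefix/suffix and re-enumerates its dot placements with a break-gated loop per split point; B instead builds the dot-placement lists for all prefixes and all suffixes by dynamic programming (each table entry derived incrementally from the neighbouring entry by appending/prepending one character), and the final pass only filters each precomputed list by the substring's first and last character.
import Mathlib
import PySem

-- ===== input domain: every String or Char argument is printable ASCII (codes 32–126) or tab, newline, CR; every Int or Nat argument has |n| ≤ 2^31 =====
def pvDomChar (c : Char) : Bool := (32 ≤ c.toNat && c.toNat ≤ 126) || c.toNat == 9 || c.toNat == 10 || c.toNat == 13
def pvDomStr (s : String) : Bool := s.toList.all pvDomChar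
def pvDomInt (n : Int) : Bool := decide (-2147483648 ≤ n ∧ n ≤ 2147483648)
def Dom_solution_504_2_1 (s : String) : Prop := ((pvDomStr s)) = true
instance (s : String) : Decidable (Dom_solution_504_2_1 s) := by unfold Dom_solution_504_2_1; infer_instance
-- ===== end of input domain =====

-- B replaces A's per-substring slice-and-break enumeration by dynamic programming:
-- dot-placement lists for every prefix (built left-to-right) and every suffix (built
-- right-to-left) are derived incrementally from the neighbouring table entry, and the
-- final pass only filters them by the first/last character (objective: alternative).

-- ===== PORT A =====

-- the float-producing loop of solution_504_2_2, with both `break`s (recursion stops)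
def pvLoopA (t : List Char) (i : Nat) (out : List (List Char)) : List (List Char) :=
  if _h : i < t.length then
    let digit := PySem.List.slice t none (some (i : Int))
    let decimal := PySem.List.slice t (some (i : Int)) none
    if 2 ≤ digit.length ∧ digit.headD ' ' = '0' then out
    else if decimal.getLastD ' ' = '0' then out
    else pvLoopA t (i + 1) (out ++ [digit ++ '.' :: decimal])
  else out
termination_by t.length - i

-- solution_504_2_2 (only ever called on non-empty slices; inputStr[0] via headD)
def pvInnerA (t : List Char) : List (List Char) :=
  let out := if t.headD ' ' ≠ '0' ∨ t = ['0'] then [t] else []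
  pvLoopA t 1 out

def solution_504_2_1 (s : String) : List String :=
  let numStr := PySem.List.slice s.toList (some 1) (some (-1))
  let out : List (List Char) :=
    (PySem.List.pyRange 1 numStr.length 1).foldl (fun out i =>
      (pvInnerA (PySem.List.slice numStr none (some i))).foldl (fun out x =>
        (pvInnerA (PySem.List.slice numStr (some i) none)).foldl (fun out y =>
          out ++ ['(' :: x ++ ',' :: ' ' :: y ++ [')']]) out) out) []
  out.map String.ofList

-- ===== PORT B =====

-- P[i+1] (dot placements in num[:i+1]) from P[i]: append num[i] to each, plus the new split
def pvBuildP (num : List Char) : List (List (List Char)) :=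
  (PySem.List.pyRange 1 num.length 1).foldl (fun P i =>
    let c := PySem.List.pyGetD num i ' '
    P.set (i.toNat + 1)
      ((P.getD i.toNat []).map (fun d => d ++ [c]) ++
        [PySem.List.slice num none (some i) ++ '.' :: [c]]))
    (List.replicate (num.length + 1) [])

-- S[i] (dot placements in num[i:]) from S[i+1]: new split first, then prepend num[i] to each
def pvBuildS (num : List Char) : List (List (List Char)) :=
  (PySem.List.pyRange ((num.length : Int) - 2) (-1) (-1)).foldl (fun S i =>
    let c := PySem.List.pyGetD num i ' '
    S.set i.toNat
      ((c :: '.' :: PySem.List.slice num (some (i + 1)) none) ::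
        (S.getD (i.toNat + 1) []).map (fun d => c :: d)))
    (List.replicate (num.length + 1) [])

-- forms(t, dots): filter the precomputed placements by t's first/last character
-- (t is non-empty at every call site, so t[0]/t[-1] are headD/getLastD exactly)
def pvFormsB (t : List Char) (dots : List (List Char)) : List (List Char) :=
  let out := if t = ['0'] ∨ t.headD ' ' ≠ '0' then [t] else []
  if t.getLastD ' ' ≠ '0' then
    out ++ (if t.headD ' ' ≠ '0' then dots else PySem.List.slice dots none (some 1))
  else out

def solution_504_2_1_alt (s : String) : List String :=
  let num := PySem.List.slice s.toList (some 1) (some (-1))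
  let P := pvBuildP num
  let S := pvBuildS num
  ((PySem.List.pyRange 1 num.length 1).flatMap (fun i =>
    (pvFormsB (PySem.List.slice num none (some i)) (P.getD i.toNat [])).flatMap (fun x =>
      (pvFormsB (PySem.List.slice num (some i) none) (S.getD i.toNat [])).map (fun y =>
        '(' :: x ++ ',' :: ' ' :: y ++ [')'])))).map String.ofList

-- ===== PRECONDITION & SPEC =====
def Spec_solution_504_2_1 (s : String) (out : List String) : Prop := out = solution_504_2_1_alt s
instance (s : String) (out : List String) : Decidable (Spec_solution_504_2_1 s out) := by unfold Spec_solution_504_2_1; infer_instance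

-- ===== CLAIM (what is proved, stated in full; the proofs are below) =====
def Claim_equal_solution_504_2_1 : Prop := ∀ (s : String), Dom_solution_504_2_1 s → Spec_solution_504_2_1 s (solution_504_2_1 s)

-- ===== LEMMAS AND PROOFS =====

-- specification of both tables: all one-dot placements in t, split position ascending
def pvDots : List Char → List (List Char)
  | [] => []
  | c :: t => if t = [] then [] else (c :: '.' :: t) :: (pvDots t).map (c :: ·)

theorem headD_take (t : List Char) (i : Nat) (hi : 1 ≤ i) :
    (t.take i).headD ' ' = t.headD ' ' := by
  cases t with
  | nil => simp
  | cons c r => cases i with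
    | zero => omega
    | succ n => simp

theorem getLastD_drop (t : List Char) (i : Nat) (hi : i < t.length) :
    (t.drop i).getLastD ' ' = t.getLastD ' ' := by
  induction t generalizing i with
  | nil => simp at hi
  | cons c r ih =>
    cases i with
    | zero => rfl
    | succ n =>
      simp only [List.drop_succ_cons]
      rw [ih n (by simpa using hi)]
      cases r with
      | nil => simp at hi
      | cons d r' => simp

-- pvDots is the slice-enumeration A's loop produces
theorem pvDots_eq_map (t : List Char) :
    (PySem.List.pyRange 1 (t.length : Int) 1).map (fun j =>
      PySem.List.slice t none (some j) ++ '.' :: PySem.List.slice t (some j) none)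
      = pvDots t := by
  induction t with
  | nil => simp [pvDots, PySem.List.pyRange_one_eq_nil]
  | cons c u ih =>
    by_cases hu : u = []
    · subst hu
      simp [pvDots, PySem.List.pyRange_one_eq_nil (by norm_num : (1:Int) ≤ 1)]
    · have hm : 1 ≤ u.length := List.length_pos_iff.mpr hu
      simp only [pvDots, if_neg hu]
      rw [show ((c::u).length : Int) = (u.length : Int) + 1 by simp]
      rw [PySem.List.pyRange_one_cons (by exact_mod_cast Nat.lt_succ_of_le hm)]
      rw [List.map_cons]
      congr 1
      · rw [show (1:Int) = ((1:Nat):Int) by simp, PySem.List.slice_to_natCast,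
          PySem.List.slice_from_natCast]
        simp
      · rw [← ih, PySem.List.pyRange_one, PySem.List.pyRange_one, List.map_map,
          List.map_map, List.map_map]
        have hlen : ((u.length : Int) + 1 - (1+1)).toNat = ((u.length : Int) - 1).toNat := by omega
        rw [hlen]
        apply List.map_congr_left
        intro k hk
        have hk' : k < u.length - 1 := by
          have := List.mem_range.mp hk; omega
        simp only [Function.comp]
        rw [show (1:Int) + 1 + k = (((2+k : Nat)):Int) by push_cast; ring,
            show (1:Int) + k = (((1+k : Nat)):Int) by push_cast; ring]
        simp only [PySem.List.slice_to_natCast, PySem.List.slice_from_natCast]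
        rw [show 2 + k = (1 + k) + 1 by omega]
        simp [Nat.add_comm 1 k]

-- snoc step (the P recurrence)
theorem pvDots_snoc (t : List Char) (c : Char) (h : t ≠ []) :
    pvDots (t ++ [c]) = (pvDots t).map (fun d => d ++ [c]) ++ [t ++ '.' :: [c]] := by
  induction t with
  | nil => simp at h
  | cons d u ih =>
    by_cases hu : u = []
    · subst hu; simp [pvDots]
    · simp only [List.cons_append, pvDots, if_neg hu, if_neg (by simp : u ++ [c] ≠ []),
        ih hu, List.map_append, List.map_map, List.map_cons]
      simp [Function.comp]

-- full-case loop characterisation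
theorem pvLoopA_full (t : List Char) (h0 : t.headD ' ' ≠ '0') (hl : t.getLastD ' ' ≠ '0') :
    ∀ i out, 1 ≤ i → pvLoopA t i out = out ++
      (PySem.List.pyRange (i : Int) (t.length : Int) 1).map (fun j =>
        PySem.List.slice t none (some j) ++ '.' :: PySem.List.slice t (some j) none) := by
  intro i out hi
  induction hn : t.length - i generalizing i out with
  | zero =>
    rw [pvLoopA]
    rw [dif_neg (by omega), PySem.List.pyRange_one_eq_nil (by omega)]
    simp
  | succ n ih =>
    have hlt : i < t.length := by omega
    rw [pvLoopA, dif_pos hlt]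
    simp only
    rw [if_neg, if_neg]
    · rw [PySem.List.pyRange_one_cons (show (i:Int) < (t.length:Int) by exact_mod_cast hlt)]
      rw [List.map_cons, ih (i+1) _ (by omega) (by omega)]
      push_cast
      simp [PySem.List.slice_to_natCast, PySem.List.slice_from_natCast]
    · rw [PySem.List.slice_from_natCast, getLastD_drop t i hlt]; exact hl
    · rw [PySem.List.slice_to_natCast]
      intro ⟨h2, hh⟩
      exact h0 (by rw [← headD_take t i hi]; exact hh)

-- the inner helper of A agrees with B's filter applied to the placement spec
theorem pvInner_eq (t : List Char) (ht : t ≠ []) : pvInnerA t = pvFormsB t (pvDots t) := by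
  unfold pvInnerA pvFormsB
  simp only []
  have hout : (if t.headD ' ' ≠ '0' ∨ t = ['0'] then [t] else ([] : List (List Char)))
      = (if t = ['0'] ∨ t.headD ' ' ≠ '0' then [t] else []) := by
    congr 1; exact propext (by tauto)
  by_cases hl : t.getLastD ' ' = '0'
  · rw [if_neg (show ¬ (t.getLastD ' ' ≠ '0') from by simpa using hl)]
    rw [pvLoopA]
    by_cases h1 : 1 < t.length
    · rw [dif_pos h1]
      simp only
      rw [if_neg, if_pos]
      · exact hout
      · rw [PySem.List.slice_from_natCast, getLastD_drop t 1 h1]; exact hl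
      · rw [PySem.List.slice_to_natCast]
        intro ⟨h2, _⟩
        simp at h2
    · rw [dif_neg h1]; exact hout
  · rw [if_pos (show t.getLastD ' ' ≠ '0' from hl)]
    by_cases h0 : t.headD ' ' = '0'
    · rw [if_neg (show ¬ (t.headD ' ' ≠ '0') from by simpa using h0)]
      have ht0 : t ≠ ['0'] := by intro h; subst h; simp at hl
      have h1 : 1 < t.length := by
        cases t with
        | nil => simp at ht
        | cons c r =>
          cases r with
          | nil => exact absurd (by simpa using h0) hl
          | cons d r' => simp
      obtain ⟨c, u, rfl⟩ : ∃ c u, t = c :: u := by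
        cases t with
        | nil => simp at ht
        | cons c u => exact ⟨c, u, rfl⟩
      have hu : u ≠ [] := by intro h; subst h; simp at h1
      have hslice : PySem.List.slice (pvDots (c :: u)) none (some 1)
          = [c :: '.' :: u] := by
        rw [show (1:Int) = ((1:Nat):Int) by simp, PySem.List.slice_to_natCast]
        simp [pvDots, if_neg hu]
      rw [hslice, ← hout]
      rw [pvLoopA, dif_pos h1]
      simp only
      rw [if_neg, if_neg]
      · rw [pvLoopA]
        by_cases h2 : 2 < (c :: u).length
        · rw [dif_pos h2]
          simp only
          rw [if_pos]
          · congr 2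
            rw [PySem.List.slice_to_natCast, PySem.List.slice_from_natCast]
            simp
          · rw [PySem.List.slice_to_natCast]
            constructor
            · simp
              first
                | exact hu
                | omega
                | exact List.length_pos_iff.mpr hu
            · rw [headD_take _ 2 (by omega)]; exact h0
        · rw [dif_neg h2]
          congr 2
          rw [PySem.List.slice_to_natCast, PySem.List.slice_from_natCast]
          simp
      · rw [PySem.List.slice_from_natCast, getLastD_drop _ 1 h1]; exact hl
      · rw [PySem.List.slice_to_natCast]
        intro ⟨h2, _⟩
        simp at h2
    · rw [if_pos (show t.headD ' ' ≠ '0' from h0), ← pvDots_eq_map, ← hout]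
      exact pvLoopA_full t h0 hl 1 _ (by omega)

-- the tables hold pvDots of every prefix / suffix
theorem pvDots_short (l : List Char) (h : l.length ≤ 1) : pvDots l = [] := by
  match l with
  | [] => rfl
  | [c] => rfl
  | c :: d :: r => simp at h

theorem getD_set {α : Type} (d : α) (l : List α) (j i : Nat) (v : α) :
    (l.set j v).getD i d = if j = i ∧ j < l.length then v else l.getD i d := by
  rw [List.getD_eq_getElem?_getD, List.getElem?_set, List.getD_eq_getElem?_getD]
  by_cases h : j = i
  · subst h
    by_cases h2 : j < l.length
    · simp [h2]
    · simp [h2]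
  · simp [h]

theorem getD_replicate (n i : Nat) :
    (List.replicate n ([] : List (List Char))).getD i [] = [] := by
  rw [List.getD_eq_getElem?_getD, List.getElem?_replicate]
  split_ifs <;> simp

theorem pvBuildP_aux (num : List Char) (k : Nat) (hk : k ≤ num.length) :
    ((PySem.List.pyRange 1 (k : Int) 1).foldl (fun P i =>
      let c := PySem.List.pyGetD num i ' '
      P.set (i.toNat + 1)
        ((P.getD i.toNat []).map (fun d => d ++ [c]) ++
          [PySem.List.slice num none (some i) ++ '.' :: [c]]))
      (List.replicate (num.length + 1) [])).length = num.length + 1 ∧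
    ∀ i : Nat, ((PySem.List.pyRange 1 (k : Int) 1).foldl (fun P i =>
      let c := PySem.List.pyGetD num i ' '
      P.set (i.toNat + 1)
        ((P.getD i.toNat []).map (fun d => d ++ [c]) ++
          [PySem.List.slice num none (some i) ++ '.' :: [c]]))
      (List.replicate (num.length + 1) [])).getD i []
      = if i ≤ k then pvDots (num.take i) else [] := by
  induction k with
  | zero =>
    rw [PySem.List.pyRange_one_eq_nil (by norm_num)]
    refine ⟨by simp, fun i => ?_⟩
    rw [List.foldl_nil, getD_replicate]
    split_ifs with hi
    · exact (pvDots_short _ (by rw [List.length_take]; omega)).symm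
    · rfl
  | succ k ih =>
    have hk' : k ≤ num.length := by omega
    obtain ⟨ihlen, ihget⟩ := ih hk'
    rcases Nat.eq_zero_or_pos k with rfl | hkpos
    · -- pyRange 1 1 = [] : same table as k = 0
      rw [show (((0:Nat)+1:Nat) : Int) = 1 by norm_num, PySem.List.pyRange_one_eq_nil (by norm_num)]
      refine ⟨by simp, fun i => ?_⟩
      rw [List.foldl_nil, getD_replicate]
      split_ifs with hi
      · exact (pvDots_short _ (by rw [List.length_take]; omega)).symm
      · rfl
    · -- k ≥ 1 : split off the last index
      rw [show ((k+1:Nat) : Int) = (k : Int) + 1 by push_cast; ring,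
        PySem.List.pyRange_one_succ_right (by exact_mod_cast hkpos),
        List.foldl_append, List.foldl_cons, List.foldl_nil]
      simp only
      constructor
      · rw [List.length_set]; exact ihlen
      · intro i
        rw [getD_set]
        have htoNat : ((k:Int)).toNat = k := by omega
        rw [htoNat, ihlen]
        by_cases hik : k + 1 = i ∧ k + 1 < num.length + 1
        · rw [if_pos hik]
          obtain ⟨rfl, hlt⟩ := hik
          rw [if_pos (le_refl _)]
          rw [ihget k, if_pos (le_refl _)]
          have hklt : k < num.length := by omega
          have hc : PySem.List.pyGetD num (k:Int) ' ' = num.getD k ' ' :=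
            PySem.List.pyGetD_natCast num k ' '
          have hc2 : num.getD k ' ' = num[k] := by
            rw [List.getD_eq_getElem?_getD, List.getElem?_eq_getElem hklt]; rfl
          rw [hc, hc2, PySem.List.slice_to_natCast]
          rw [List.take_add_one, List.getElem?_eq_getElem hklt, Option.toList_some]
          have htk : num.take k ≠ [] := by
            rw [List.ne_nil_iff_length_pos, List.length_take]; omega
          rw [pvDots_snoc _ _ htk]
        · rw [if_neg hik, ihget i]
          have hne : ¬ (k + 1 = i) := fun h => hik ⟨h, by omega⟩
          split_ifs with h1 h2 <;> first | rfl | omega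

theorem pvBuildS_aux (num : List Char) (m : Nat) (hm : m ≤ num.length - 1) :
    ∀ T : List (List (List Char)), T.length = num.length + 1 →
    (∀ i : Nat, T.getD i [] = if m ≤ i ∧ i ≤ num.length then pvDots (num.drop i) else []) →
    ∀ i : Nat, ((PySem.List.pyRange ((m:Int) - 1) (-1) (-1)).foldl (fun S i =>
      let c := PySem.List.pyGetD num i ' '
      S.set i.toNat
        ((c :: '.' :: PySem.List.slice num (some (i + 1)) none) ::
          (S.getD (i.toNat + 1) []).map (fun d => c :: d))) T).getD i []
      = if i ≤ num.length then pvDots (num.drop i) else [] := by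
  induction m with
  | zero =>
    intro T hlen hinv i
    rw [show ((0:Nat) : Int) - 1 = -1 by norm_num,
      PySem.List.pyRange_neg_one_eq_nil (by norm_num), List.foldl_nil, hinv i]
    split_ifs with h1 h2 <;> first | rfl | omega
  | succ m ih =>
    intro T hlen hinv i
    have hm' : m ≤ num.length - 1 := by omega
    have hmn : m + 1 < num.length := by omega
    have hmlt : m < num.length := by omega
    rw [show (((m+1:Nat)) : Int) - 1 = (m : Int) by push_cast; ring,
      PySem.List.pyRange_neg_one_cons (show (-1:Int) < (m:Int) by omega),
      List.foldl_cons]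
    simp only
    apply ih hm'
    · rw [List.length_set]; exact hlen
    · intro j
      rw [getD_set]
      have htoNat : ((m:Int)).toNat = m := by omega
      rw [htoNat, hlen]
      by_cases hj : m = j ∧ m < num.length + 1
      · rw [if_pos hj]
        obtain ⟨rfl, _⟩ := hj
        rw [if_pos ⟨le_refl m, by omega⟩]
        have hc : PySem.List.pyGetD num (m:Int) ' ' = num.getD m ' ' :=
          PySem.List.pyGetD_natCast num m ' '
        have hc2 : num.getD m ' ' = num[m] := by
          rw [List.getD_eq_getElem?_getD, List.getElem?_eq_getElem hmlt]; rfl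
        rw [hc, hc2, hinv (m+1), if_pos ⟨by omega, by omega⟩,
          show (m : Int) + 1 = ((m+1 : Nat) : Int) by push_cast; ring,
          PySem.List.slice_from_natCast,
          List.drop_eq_getElem_cons hmlt]
        have hdne : num.drop (m+1) ≠ [] := by
          rw [List.ne_nil_iff_length_pos, List.length_drop]; omega
        rw [pvDots]
        rw [if_neg hdne]
      · rw [if_neg hj, hinv j]
        have hne : m ≠ j := fun h => hj ⟨h, by omega⟩
        split_ifs with h1 h2 <;> first | rfl | omega

theorem pvBuildP_getD (num : List Char) (i : Nat) (hi : i ≤ num.length) :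
    (pvBuildP num).getD i [] = pvDots (num.take i) := by
  unfold pvBuildP
  obtain ⟨_, hget⟩ := pvBuildP_aux num num.length le_rfl
  rw [hget i, if_pos hi]

theorem pvBuildS_getD (num : List Char) (i : Nat) (hi : i ≤ num.length) :
    (pvBuildS num).getD i [] = pvDots (num.drop i) := by
  unfold pvBuildS
  rcases Nat.eq_zero_or_pos num.length with hn | hn
  · rw [PySem.List.pyRange_neg_one_eq_nil (by omega), List.foldl_nil, getD_replicate]
    rw [pvDots_short _ (by rw [List.length_drop]; omega)]
  · rw [show ((num.length : Int)) - 2 = ((num.length - 1 : Nat) : Int) - 1 by omega]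
    rw [pvBuildS_aux num (num.length - 1) (by omega) _ (by simp)
      (fun j => by
        rw [getD_replicate]
        split_ifs with h
        · exact (pvDots_short _ (by rw [List.length_drop]; omega)).symm
        · rfl) i]
    rw [if_pos hi]

theorem outer_fold (X Y : Int → List (List Char)) (g : Int → List Char → List Char → List Char) :
    ∀ (l : List Int) (acc : List (List Char)),
    l.foldl (fun out i => (X i).foldl (fun out x => (Y i).foldl (fun out y => out ++ [g i x y]) out) out) acc
      = acc ++ l.flatMap (fun i => (X i).flatMap (fun x => (Y i).map (g i x))) := by
  intro l acc
  simp only [PySem.List.foldl_append_eq_flatMap, List.map_eq_flatMap]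

theorem flatMap_congr_mem {α β : Type} (l : List α) (f g : α → List β)
    (h : ∀ x ∈ l, f x = g x) : l.flatMap f = l.flatMap g := by
  induction l with
  | nil => rfl
  | cons a l ih => simp only [List.flatMap_cons, h a (by simp), ih (fun x hx => h x (by simp [hx]))]

theorem solution_504_2_1_spec : Claim_equal_solution_504_2_1 := by
  intro s _
  unfold Spec_solution_504_2_1 solution_504_2_1 solution_504_2_1_alt
  simp only [outer_fold, List.nil_append]
  congr 1
  apply flatMap_congr_mem
  intro i hi
  have ⟨h1, h2⟩ := (PySem.List.mem_pyRange_one.mp hi)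
  set num := PySem.List.slice s.toList (some 1) (some (-1)) with hnum
  have hieq : ((i.toNat : Int)) = i := Int.toNat_of_nonneg (by omega)
  have hiton : i.toNat ≤ num.length := by omega
  have hilt : i.toNat < num.length := by omega
  have hipos : 1 ≤ i.toNat := by omega
  rw [← hieq, PySem.List.slice_to_natCast, PySem.List.slice_from_natCast]
  simp only [Int.toNat_natCast]
  rw [pvBuildP_getD num i.toNat hiton, pvBuildS_getD num i.toNat hiton,
    pvInner_eq _ (by rw [List.ne_nil_iff_length_pos]; simp; omega),
    pvInner_eq _ (by rw [List.ne_nil_iff_length_pos]; simp; omega)]
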